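-- pv_equiv track=rewrite | github.com/ccmfb/magnetic_quivers | src/brane_web.py | get_maximal_decompositions_old
-- ===== SOURCE A (Python) =====
-- import itertools
-- import collections
--
-- def get_maximal_decompositions_old(decompositions):
--     not_maximal_indices = set()
--     for i, decomposition in enumerate(decompositions):
--         for subweb in decomposition:
--
--             for j, other_decomposition in enumerate(decompositions):
--                 if i == j: continue
--
--                 # Check if subweb can be formed by joining two or more subwebs from other_decomposition
--                 for r in range(2, len(other_decomposition) + 1):
--                     for combination in itertools.combinations(other_decomposition, r):
--                         union = []
--                         for part in combination:
--                             union.extend(part)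
--
--                         if collections.Counter(union) == collections.Counter(subweb):
--                             not_maximal_indices.add(i)
--
--     maximal_decompositions = [decompositions[i] for i in range(len(decompositions)) if i not in not_maximal_indices]
--
--     return maximal_decompositions
-- ===== SOURCE B (Python) =====
-- from collections import Counter
--
--
-- def _covered(subweb, parts):
--     # subweb equals the disjoint union of >= 2 parts  <=>  the multiset union of
--     # ALL parts that are sub-multisets of subweb equals subweb (parts of one
--     # decomposition are pairwise disjoint), and there are >= 2 such parts.
--     target = Counter(subweb)
--     chosen = [p for p in parts if not (Counter(p) - target)]
--     if len(chosen) < 2: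
--         return False
--     total = Counter()
--     for p in chosen:
--         total += Counter(p)
--     return total == target
--
--
-- def get_maximal_decompositions_old(decompositions):
--     result = []
--     for i, dec in enumerate(decompositions):
--         flagged = any(
--             j != i and _covered(subweb, other)
--             for subweb in dec
--             for j, other in enumerate(decompositions))
--         if not flagged:
--             result.append(dec)
--     return result
-- ===== Notes on version B (the rewrite author's own statement) =====
-- stated objective: faster
-- what changed: Instead of enumerating every itertools.combinations subset of another decomposition's parts (exponential in its size), B collects in one pass the parts that are sub-multisets of the subweb and checks that their multiset union equals the subweb with at least 2 parts collected; Pre_ requires parts within each decomposition to be pairwise disjoint, which makes this single candidate set exhaustive.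
import Mathlib
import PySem

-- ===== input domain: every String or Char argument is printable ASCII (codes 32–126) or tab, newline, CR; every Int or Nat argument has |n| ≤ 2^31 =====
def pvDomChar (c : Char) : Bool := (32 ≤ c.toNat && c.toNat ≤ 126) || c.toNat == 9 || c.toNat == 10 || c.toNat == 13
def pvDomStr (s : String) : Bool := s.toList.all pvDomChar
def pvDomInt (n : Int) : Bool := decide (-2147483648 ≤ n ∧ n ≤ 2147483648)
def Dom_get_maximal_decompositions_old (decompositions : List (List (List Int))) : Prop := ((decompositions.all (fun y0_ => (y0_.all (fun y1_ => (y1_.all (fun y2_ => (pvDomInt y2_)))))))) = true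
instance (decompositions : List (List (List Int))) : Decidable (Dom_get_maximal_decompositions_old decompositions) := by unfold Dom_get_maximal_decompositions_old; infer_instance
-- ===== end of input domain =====

-- B replaces A's scan over all itertools.combinations of another decomposition's parts by one
-- collect-and-compare pass over those parts (valid because parts of a decomposition are
-- pairwise disjoint — see Pre_ below); objective: faster.

-- ===== PORT A =====

-- itertools.combinations(xs, r), in itertools' order; exact for the membership facts used here
def pyCombinations {α : Type} : Nat → List α → List (List α)
  | 0, _ => [[]]
  | _+1, [] => []
  | r+1, x :: xs => (pyCombinations r xs).map (x :: ·) ++ pyCombinations (r+1) xs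

def get_maximal_decompositions_old (decompositions : List (List (List Int))) : List (List (List Int)) :=
  -- not_maximal_indices = set(); the four nested loops conditionally add i
  let not_maximal_indices : PySem.Set Int :=
    (PySem.List.enumerate decompositions 0).foldl (fun acc1 idec =>
      idec.2.foldl (fun acc2 (subweb : List Int) =>
        (PySem.List.enumerate decompositions 0).foldl (fun acc3 jother =>
          if idec.1 = jother.1 then acc3 else
          (PySem.List.pyRange 2 (PySem.List.len jother.2 + 1) 1).foldl (fun acc4 r =>
            -- r ranges over 2..len(other_decomposition), so r.toNat is exact here
            (pyCombinations r.toNat jother.2).foldl (fun acc5 (comb : List (List Int)) =>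
              let union : List Int := comb.foldl (fun u part => u ++ part) []
              -- 'Counter(union) == Counter(subweb)' compares element multiplicities:
              -- exact as multiset equality of the two lists
              if (↑union : Multiset Int) = (↑subweb : Multiset Int)
              then PySem.Set.add acc5 idec.1 else acc5) acc4) acc3) acc2) acc1)
      PySem.Set.empty
  (PySem.List.pyRange 0 (PySem.List.len decompositions) 1).foldl (fun res i =>
    if not_maximal_indices.contains i then res
    else res ++ [PySem.List.pyGetD decompositions i []]) []

-- ===== PORT B =====

-- _covered: 'Counter(p) - target is empty' is the sub-multiset test ↑p ≤ target; the Counter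
-- sum and the final Counter equality are multiset sum and multiset equality (exact)
def pvCovered (subweb : List Int) (parts : List (List Int)) : Bool :=
  let target : Multiset Int := ↑subweb
  let chosen := parts.filter (fun (p : List Int) => decide ((↑p : Multiset Int) ≤ target))
  decide (2 ≤ chosen.length) && decide ((chosen.map (fun (p : List Int) => (↑p : Multiset Int))).sum = target)

def get_maximal_decompositions_old_alt (decompositions : List (List (List Int))) : List (List (List Int)) :=
  (PySem.List.enumerate decompositions 0).foldl (fun res idec =>
    if idec.2.any (fun (subweb : List Int) =>
        (PySem.List.enumerate decompositions 0).any (fun jother =>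
          decide (jother.1 ≠ idec.1) && pvCovered subweb jother.2))
    then res else res ++ [idec.2]) []

-- ===== PRECONDITION & SPEC =====

-- Pre_ excludes inputs where two parts of one decomposition share an element value: there B's
-- single collect-and-compare candidate can miss a union that A's combination scan finds, and
-- the check is only meaningful for the intended 'decomposition = disjoint subwebs' shape.
def Pre_get_maximal_decompositions_old (decompositions : List (List (List Int))) : Prop :=
  ∀ dec ∈ decompositions, List.Pairwise (fun a b => ∀ x ∈ a, x ∉ b) dec
instance (decompositions : List (List (List Int))) : Decidable (Pre_get_maximal_decompositions_old decompositions) := by unfold Pre_get_maximal_decompositions_old; infer_instance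

def pvWitness_get_maximal_decompositions_old : List (List (List Int)) := [[[1], [2]], [[1, 2]]]

def Spec_get_maximal_decompositions_old (decompositions : List (List (List Int))) (out : List (List (List Int))) : Prop := out = get_maximal_decompositions_old_alt decompositions
instance (decompositions : List (List (List Int))) (out : List (List (List Int))) : Decidable (Spec_get_maximal_decompositions_old decompositions out) := by unfold Spec_get_maximal_decompositions_old; infer_instance

-- ===== CLAIM (what is proved, stated in full; the proofs are below) =====
def Claim_equal_get_maximal_decompositions_old : Prop := ∀ (decompositions : List (List (List Int))), Dom_get_maximal_decompositions_old decompositions → Pre_get_maximal_decompositions_old decompositions → Spec_get_maximal_decompositions_old decompositions (get_maximal_decompositions_old decompositions)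

-- ===== LEMMAS AND PROOFS =====

-- multiset union of a list of parts
def pvMsum (c : List (List Int)) : Multiset Int := (c.map (fun (p : List Int) => (↑p : Multiset Int))).sum

theorem mem_pyCombinations {α : Type} (r : Nat) (l : List α) (c : List α) :
    c ∈ pyCombinations r l ↔ c.Sublist l ∧ c.length = r := by
  induction l generalizing r c with
  | nil =>
    cases r with
    | zero => simp [pyCombinations, List.length_eq_zero_iff]
    | succ r => simp only [pyCombinations, List.not_mem_nil, false_iff]; rintro ⟨hs, hl⟩; simp [List.sublist_nil.mp hs] at hl
  | cons x xs ih =>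
    cases r with
    | zero =>
      simp [pyCombinations, List.length_eq_zero_iff]
      intro h; subst h; exact List.nil_sublist _
    | succ r =>
      simp only [pyCombinations, List.mem_append, List.mem_map, ih]
      constructor
      · rintro (⟨c', ⟨hs, hl⟩, rfl⟩ | ⟨hs, hl⟩)
        · exact ⟨List.Sublist.cons₂ x hs, by simp [hl]⟩
        · exact ⟨List.Sublist.cons x hs, hl⟩
      · rintro ⟨hs, hl⟩
        rcases List.sublist_cons_iff.mp hs with h | ⟨c', rfl, h⟩
        · exact Or.inr ⟨h, hl⟩
        · exact Or.inl ⟨c', ⟨h, by simpa using hl⟩, rfl⟩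

theorem pvMsum_flatten (c : List (List Int)) :
    (↑(c.foldl (fun u part => u ++ part) ([] : List Int)) : Multiset Int) = pvMsum c := by
  rw [PySem.List.foldl_append_eq_flatten]
  simp only [List.nil_append]
  induction c with
  | nil => rfl
  | cons a t ih => simp [pvMsum, List.flatten_cons, ← Multiset.coe_add, ih]

theorem mem_pvMsum (x : Int) (c : List (List Int)) : x ∈ pvMsum c ↔ ∃ q ∈ c, x ∈ q := by
  induction c with
  | nil => simp [pvMsum]
  | cons a t ih => simp [pvMsum] at ih ⊢; simp [ih]

-- the extra parts an already-complete disjoint cover could pick up are all empty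
theorem pvMsum_eq_of_sublist (c F : List (List Int)) (h : c.Sublist F)
    (hd : List.Pairwise (fun a b => ∀ x ∈ a, x ∉ b) F)
    (hle : ∀ q ∈ F, (↑q : Multiset Int) ≤ pvMsum c) : pvMsum F = pvMsum c := by
  induction h with
  | slnil => rfl
  | @cons c F' a h ih =>
    have hd' := (List.pairwise_cons.mp hd).2
    have hda := (List.pairwise_cons.mp hd).1
    have hF' : pvMsum F' = pvMsum c := ih hd' (fun q hq => hle q (List.mem_cons_of_mem _ hq))
    have ha : a = [] := by
      by_contra hne
      rcases List.exists_mem_of_ne_nil a hne with ⟨x, hx⟩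
      have hxm : x ∈ pvMsum F' := by
        rw [hF']
        exact Multiset.mem_of_le (hle a (List.mem_cons_self)) (by simpa using hx)
      rcases (mem_pvMsum x F').mp hxm with ⟨q, hq, hxq⟩
      exact hda q hq x hx hxq
    subst ha
    simpa [pvMsum] using hF'
  | @cons₂ c' F' a h ih =>
    have hd' := (List.pairwise_cons.mp hd).2
    have hda := (List.pairwise_cons.mp hd).1
    have key : ∀ q ∈ F', (↑q : Multiset Int) ≤ pvMsum c' := by
      intro q hq
      have h1 : (↑q : Multiset Int) ≤ (↑a : Multiset Int) + pvMsum c' := by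
        have := hle q (List.mem_cons_of_mem _ hq)
        simpa [pvMsum, add_comm] using this
      rw [Multiset.le_iff_count] at h1 ⊢
      intro x
      by_cases hxq : x ∈ q
      · have hxa : x ∉ a := fun hxa => hda q hq x hxa hxq
        have := h1 x
        simpa [Multiset.count_eq_zero_of_notMem (by simpa using hxa : x ∉ (↑a : Multiset Int))] using this
      · simp [Multiset.count_eq_zero_of_notMem (by simpa using hxq : x ∉ (↑q : Multiset Int))]
    have hF' : pvMsum F' = pvMsum c' := ih hd' key
    simp [pvMsum] at hF' ⊢
    rw [hF']

-- core: a >=2-part disjoint cover exists iff ALL sub-multiset parts cover, with >= 2 of them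
theorem pv_cover_iff (parts : List (List Int)) (t : Multiset Int)
    (hd : List.Pairwise (fun a b => ∀ x ∈ a, x ∉ b) parts) :
    (∃ c, c.Sublist parts ∧ 2 ≤ c.length ∧ pvMsum c = t) ↔
      (2 ≤ (parts.filter (fun (p : List Int) => decide ((↑p : Multiset Int) ≤ t))).length ∧
        pvMsum (parts.filter (fun (p : List Int) => decide ((↑p : Multiset Int) ≤ t))) = t) := by
  have hFsub : (parts.filter (fun (p : List Int) => decide ((↑p : Multiset Int) ≤ t))).Sublist parts :=
    List.filter_sublist
  constructor
  · rintro ⟨c, hs, hl, hsum⟩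
    have hcmem : ∀ p ∈ c, (↑p : Multiset Int) ≤ t := by
      intro p hp
      rw [← hsum]
      exact List.le_sum_of_mem (List.mem_map_of_mem (f := fun (p : List Int) => ((↑p : Multiset Int))) hp)
    have hcF : c.Sublist (parts.filter (fun (p : List Int) => decide ((↑p : Multiset Int) ≤ t))) := by
      have h2 := List.Sublist.filter (fun (p : List Int) => decide ((↑p : Multiset Int) ≤ t)) hs
      rwa [List.filter_eq_self.mpr (by simpa using hcmem)] at h2
    have hsumF : pvMsum (parts.filter (fun (p : List Int) => decide ((↑p : Multiset Int) ≤ t))) = pvMsum c := by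
      apply pvMsum_eq_of_sublist c _ hcF (hd.sublist hFsub)
      intro q hq
      rw [hsum]
      simpa using List.of_mem_filter hq
    exact ⟨le_trans hl (hcF.length_le), by rw [hsumF, hsum]⟩
  · rintro ⟨hl, hsum⟩
    exact ⟨_, hFsub, hl, hsum⟩

theorem pv_mem_foldl_set {β : Type} (G : PySem.Set Int → β → PySem.Set Int) (v : Int) (Q : β → Prop)
    (hG : ∀ acc b x, x ∈ G acc b ↔ x ∈ acc ∨ (x = v ∧ Q b)) :
    ∀ (l : List β) (s : PySem.Set Int) (x : Int),
      x ∈ l.foldl G s ↔ x ∈ s ∨ (x = v ∧ ∃ b ∈ l, Q b) := by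
  intro l
  induction l with
  | nil => simp
  | cons a t ih =>
    intro s x
    simp only [List.foldl_cons, ih, hG, List.mem_cons]
    constructor
    · rintro ((h | ⟨rfl, hq⟩) | ⟨rfl, b, hb, hq⟩)
      · exact Or.inl h
      · exact Or.inr ⟨rfl, a, Or.inl rfl, hq⟩
      · exact Or.inr ⟨rfl, b, Or.inr hb, hq⟩
    · rintro (h | ⟨rfl, b, (rfl | hb), hq⟩)
      · exact Or.inl (Or.inl h)
      · exact Or.inl (Or.inr ⟨rfl, hq⟩)
      · exact Or.inr ⟨rfl, b, hb, hq⟩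

theorem pv_mem_add_if (s : PySem.Set Int) (v x : Int) (c : Prop) [Decidable c] :
    x ∈ (if c then PySem.Set.add s v else s) ↔ x ∈ s ∨ (x = v ∧ c) := by
  split_ifs with h
  · rw [PySem.Set.mem_add]; tauto
  · tauto

-- A's flag condition for index i with decomposition dec
def pvFlagged (ds : List (List (List Int))) (i : Int) (dec : List (List Int)) : Prop :=
  ∃ subweb ∈ dec, ∃ jo ∈ PySem.List.enumerate ds 0, i ≠ jo.1 ∧
    ∃ r ∈ PySem.List.pyRange 2 (PySem.List.len jo.2 + 1) 1,
      ∃ c ∈ pyCombinations r.toNat jo.2,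
        (↑(c.foldl (fun u part => u ++ part) ([] : List Int)) : Multiset Int) = (↑subweb : Multiset Int)

-- membership in the set A builds
theorem pv_mem_buildSet (ds : List (List (List Int))) (x : Int) :
    x ∈ (PySem.List.enumerate ds 0).foldl (fun acc1 idec =>
      idec.2.foldl (fun acc2 (subweb : List Int) =>
        (PySem.List.enumerate ds 0).foldl (fun acc3 jother =>
          if idec.1 = jother.1 then acc3 else
          (PySem.List.pyRange 2 (PySem.List.len jother.2 + 1) 1).foldl (fun acc4 r =>
            (pyCombinations r.toNat jother.2).foldl (fun acc5 (comb : List (List Int)) =>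
              let union : List Int := comb.foldl (fun u part => u ++ part) []
              if (↑union : Multiset Int) = (↑subweb : Multiset Int)
              then PySem.Set.add acc5 idec.1 else acc5) acc4) acc3) acc2) acc1)
      PySem.Set.empty
    ↔ ∃ p ∈ PySem.List.enumerate ds 0, x = p.1 ∧ pvFlagged ds p.1 p.2 := by
  have hstep : ∀ (p : Int × List (List Int)) (s : PySem.Set Int) (x : Int),
      x ∈ p.2.foldl (fun acc2 (subweb : List Int) =>
        (PySem.List.enumerate ds 0).foldl (fun acc3 jother =>
          if p.1 = jother.1 then acc3 else
          (PySem.List.pyRange 2 (PySem.List.len jother.2 + 1) 1).foldl (fun acc4 r =>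
            (pyCombinations r.toNat jother.2).foldl (fun acc5 (comb : List (List Int)) =>
              let union : List Int := comb.foldl (fun u part => u ++ part) []
              if (↑union : Multiset Int) = (↑subweb : Multiset Int)
              then PySem.Set.add acc5 p.1 else acc5) acc4) acc3) acc2) s
      ↔ x ∈ s ∨ (x = p.1 ∧ pvFlagged ds p.1 p.2) := by
    intro p s x
    rw [pv_mem_foldl_set _ p.1
      (fun (subweb : List Int) => ∃ jo ∈ PySem.List.enumerate ds 0, p.1 ≠ jo.1 ∧
        ∃ r ∈ PySem.List.pyRange 2 (PySem.List.len jo.2 + 1) 1,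
          ∃ c ∈ pyCombinations r.toNat jo.2,
            (↑(c.foldl (fun u part => u ++ part) ([] : List Int)) : Multiset Int) = (↑subweb : Multiset Int))]
    · rfl
    intro acc subweb y
    rw [pv_mem_foldl_set _ p.1
      (fun (jo : Int × List (List Int)) => p.1 ≠ jo.1 ∧
        ∃ r ∈ PySem.List.pyRange 2 (PySem.List.len jo.2 + 1) 1,
          ∃ c ∈ pyCombinations r.toNat jo.2,
            (↑(c.foldl (fun u part => u ++ part) ([] : List Int)) : Multiset Int) = (↑subweb : Multiset Int))]
    intro acc3 jo z
    by_cases hij : p.1 = jo.1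
    · rw [if_pos hij]
      constructor
      · intro h; exact Or.inl h
      · rintro (h | ⟨rfl, hne, _⟩)
        · exact h
        · exact absurd hij hne
    · simp only [if_neg hij]
      rw [pv_mem_foldl_set _ p.1
        (fun (r : Int) => ∃ c ∈ pyCombinations r.toNat jo.2,
            (↑(c.foldl (fun u part => u ++ part) ([] : List Int)) : Multiset Int) = (↑subweb : Multiset Int))]
      · constructor
        · rintro (h | ⟨rfl, hr⟩)
          · exact Or.inl h
          · exact Or.inr ⟨rfl, hij, hr⟩
        · rintro (h | ⟨rfl, _, hr⟩)
          · exact Or.inl h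
          · exact Or.inr ⟨rfl, hr⟩
      intro acc4 r w
      rw [pv_mem_foldl_set _ p.1
        (fun (comb : List (List Int)) => (↑(comb.foldl (fun u part => u ++ part) ([] : List Int)) : Multiset Int) = (↑subweb : Multiset Int))]
      intro acc5 comb v
      exact pv_mem_add_if _ _ _ _
  suffices h : ∀ (l : List (Int × List (List Int))) (s : PySem.Set Int),
      x ∈ l.foldl (fun acc1 idec =>
        idec.2.foldl (fun acc2 (subweb : List Int) =>
          (PySem.List.enumerate ds 0).foldl (fun acc3 jother =>
            if idec.1 = jother.1 then acc3 else
            (PySem.List.pyRange 2 (PySem.List.len jother.2 + 1) 1).foldl (fun acc4 r =>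
              (pyCombinations r.toNat jother.2).foldl (fun acc5 (comb : List (List Int)) =>
                let union : List Int := comb.foldl (fun u part => u ++ part) []
                if (↑union : Multiset Int) = (↑subweb : Multiset Int)
                then PySem.Set.add acc5 idec.1 else acc5) acc4) acc3) acc2) acc1) s
      ↔ x ∈ s ∨ ∃ p ∈ l, x = p.1 ∧ pvFlagged ds p.1 p.2 by
    rw [h (PySem.List.enumerate ds 0) PySem.Set.empty]
    simp [PySem.Set.empty]
  intro l
  induction l with
  | nil => simp
  | cons a t ih =>
    intro s
    simp only [List.foldl_cons, ih, hstep a, List.mem_cons]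
    constructor
    · rintro ((h | h) | ⟨p, hp, hx⟩)
      · exact Or.inl h
      · exact Or.inr ⟨a, Or.inl rfl, h⟩
      · exact Or.inr ⟨p, Or.inr hp, hx⟩
    · rintro (h | ⟨p, (rfl | hp), hx⟩)
      · exact Or.inl (Or.inl h)
      · exact Or.inl (Or.inr hx)
      · exact Or.inr ⟨p, hp, hx⟩

theorem pv_exists_comb_iff (parts : List (List Int)) (t : Multiset Int) :
    (∃ r ∈ PySem.List.pyRange 2 (PySem.List.len parts + 1) 1,
      ∃ c ∈ pyCombinations r.toNat parts,
        (↑(c.foldl (fun u part => u ++ part) ([] : List Int)) : Multiset Int) = t) ↔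
    (∃ c, c.Sublist parts ∧ 2 ≤ c.length ∧ pvMsum c = t) := by
  constructor
  · rintro ⟨r, hr, c, hc, hsum⟩
    rw [PySem.List.mem_pyRange_one] at hr
    rcases (mem_pyCombinations _ _ _).mp hc with ⟨hsub, hlen⟩
    refine ⟨c, hsub, by omega, ?_⟩
    rw [← pvMsum_flatten]; exact hsum
  · rintro ⟨c, hsub, hlen, hsum⟩
    refine ⟨(c.length : Int), ?_, c, ?_, ?_⟩
    · rw [PySem.List.mem_pyRange_one]
      have := hsub.length_le
      simp only [PySem.List.len_eq]
      omega
    · rw [mem_pyCombinations]; exact ⟨hsub, by simp⟩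
    · rw [pvMsum_flatten]; exact hsum

theorem pv_covered_iff (subweb : List Int) (parts : List (List Int))
    (hd : List.Pairwise (fun a b => ∀ x ∈ a, x ∉ b) parts) :
    (∃ r ∈ PySem.List.pyRange 2 (PySem.List.len parts + 1) 1,
      ∃ c ∈ pyCombinations r.toNat parts,
        (↑(c.foldl (fun u part => u ++ part) ([] : List Int)) : Multiset Int) = (↑subweb : Multiset Int)) ↔
    pvCovered subweb parts = true := by
  rw [pv_exists_comb_iff, pv_cover_iff parts _ hd]
  simp [pvCovered, pvMsum]

theorem pv_enumerate_fst_inj (ds : List (List (List Int))) (p q : Int × List (List Int))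
    (hp : p ∈ PySem.List.enumerate ds 0) (hq : q ∈ PySem.List.enumerate ds 0) (h : p.1 = q.1) : p = q := by
  rcases (PySem.List.mem_enumerate_iff _ _ _).mp hp with ⟨k, hk, rfl⟩
  rcases (PySem.List.mem_enumerate_iff _ _ _).mp hq with ⟨k', hk', rfl⟩
  simp only at h
  have : k = k' := by omega
  subst this; rfl

theorem pv_final (ds : List (List (List Int)))
    (hpre : ∀ dec ∈ ds, List.Pairwise (fun a b => ∀ x ∈ a, x ∉ b) dec) :
    get_maximal_decompositions_old ds = get_maximal_decompositions_old_alt ds := by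
  unfold get_maximal_decompositions_old get_maximal_decompositions_old_alt
  simp only []
  -- rewrite A's final index loop into a loop over enumerate
  have hrange : PySem.List.pyRange 0 (PySem.List.len ds) 1 = (PySem.List.enumerate ds 0).map (·.1) := by
    rw [PySem.List.map_fst_enumerate]
    simp [PySem.List.len_eq]
  rw [hrange, List.foldl_map]
  apply PySem.List.foldl_congr_mem
  intro res p hp
  rcases (PySem.List.mem_enumerate_iff _ _ _).mp hp with ⟨k, hk, hpk⟩
  have hget : PySem.List.pyGetD ds p.1 [] = p.2 := by
    subst hpk
    simp [PySem.List.pyGetD_natCast, List.getD_eq_getElem?_getD, hk]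
  have hcond : (PySem.Set.contains ((PySem.List.enumerate ds 0).foldl (fun acc1 idec =>
      idec.2.foldl (fun acc2 (subweb : List Int) =>
        (PySem.List.enumerate ds 0).foldl (fun acc3 jother =>
          if idec.1 = jother.1 then acc3 else
          (PySem.List.pyRange 2 (PySem.List.len jother.2 + 1) 1).foldl (fun acc4 r =>
            (pyCombinations r.toNat jother.2).foldl (fun acc5 (comb : List (List Int)) =>
              let union : List Int := comb.foldl (fun u part => u ++ part) []
              if (↑union : Multiset Int) = (↑subweb : Multiset Int)
              then PySem.Set.add acc5 idec.1 else acc5) acc4) acc3) acc2) acc1)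
      PySem.Set.empty) p.1)
      = (p.2.any (fun (subweb : List Int) =>
        (PySem.List.enumerate ds 0).any (fun jother =>
          decide (jother.1 ≠ p.1) && pvCovered subweb jother.2))) := by
    rw [Bool.eq_iff_iff, PySem.Set.contains_iff, pv_mem_buildSet]
    constructor
    · rintro ⟨q, hq, hxq, hflag⟩
      have : q = p := pv_enumerate_fst_inj ds q p hq hp hxq.symm
      subst this
      rcases hflag with ⟨subweb, hsw, jo, hjo, hne, hr⟩
      simp only [List.any_eq_true, Bool.and_eq_true, decide_eq_true_eq]
      refine ⟨subweb, hsw, jo, hjo, fun h => hne h.symm, ?_⟩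
      rw [← pv_covered_iff subweb jo.2 (hpre jo.2 ?_)]
      · exact hr
      · rcases (PySem.List.mem_enumerate_iff _ _ _).mp hjo with ⟨k', hk', rfl⟩
        simp
    · intro h
      simp only [List.any_eq_true, Bool.and_eq_true, decide_eq_true_eq] at h
      rcases h with ⟨subweb, hsw, jo, hjo, hne, hcov⟩
      refine ⟨p, hp, rfl, subweb, hsw, jo, hjo, fun h => hne h.symm, ?_⟩
      rw [pv_covered_iff subweb jo.2 (hpre jo.2 ?_)]
      · exact hcov
      · rcases (PySem.List.mem_enumerate_iff _ _ _).mp hjo with ⟨k', hk', rfl⟩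
        simp
  rw [hcond, hget]

-- ===== VERDICT (by name: the statement is the Claim_ definition above) =====
theorem get_maximal_decompositions_old_spec : Claim_equal_get_maximal_decompositions_old := by
  intro ds _ hpre
  unfold Spec_get_maximal_decompositions_old
  exact pv_final ds hpre
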